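-- pv_equiv track=rewrite | github.com/tomjrwilliams/ceg | src/ceg/app/model.py | kwargs_ready
-- ===== SOURCE A (Python) =====
-- from typing import cast, Iterable, Callable, get_type_hints, get_args, get_origin, Type, NamedTuple, Union, Optional, Any, Annotated
--
-- def kwargs_ready(
--     vs: list[str | None]
-- ) -> tuple[bool, list[str]]:
--     try:
--         end = vs.index(".")
--         return True, cast(list[str], [
--             v for v in vs[:end] if v is not None
--         ])
--     except:
--         if all([v is not None for v in vs]):
--             return True, cast(list[str], vs)
--         return False, []
-- ===== SOURCE B (Python) =====
-- def kwargs_ready(vs):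
--     result = []
--     saw_none = False
--     for v in vs:
--         if v == ".":
--             return True, result
--         if v is None:
--             saw_none = True
--         else:
--             result.append(v)
--     if saw_none:
--         return False, []
--     return True, result
-- ===== Notes on version B (the rewrite author's own statement) =====
-- stated objective: alternative
-- what changed: Replaces A's three separate scans (vs.index('.'), a slice-comprehension over the prefix, and an all() scan over a built list) by one fused single-pass loop with early exit that maintains the filtered result and a saw-None flag.
import Mathlib
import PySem

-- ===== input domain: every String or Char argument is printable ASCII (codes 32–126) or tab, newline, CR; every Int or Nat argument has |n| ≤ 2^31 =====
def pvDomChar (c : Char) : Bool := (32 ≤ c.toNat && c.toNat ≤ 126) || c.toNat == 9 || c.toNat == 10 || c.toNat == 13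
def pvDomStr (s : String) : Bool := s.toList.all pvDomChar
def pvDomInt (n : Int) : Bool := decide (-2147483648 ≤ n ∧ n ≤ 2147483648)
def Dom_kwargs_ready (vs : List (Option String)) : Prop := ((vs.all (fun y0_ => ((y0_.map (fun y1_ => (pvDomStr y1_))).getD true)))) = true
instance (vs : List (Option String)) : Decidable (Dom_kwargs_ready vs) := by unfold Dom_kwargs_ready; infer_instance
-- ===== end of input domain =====

-- B fuses A's three scans (index, slice-comprehension, all) into one single-pass loop with early exit; same cost, different decomposition.

-- ===== PORT A =====
def kwargs_ready (vs : List (Option String)) : Bool × List String :=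
  match PySem.List.index? vs (some ".") with
  | some e => (true, (PySem.List.slice vs none (some (e : Int))).filterMap id)
  | none =>
    if vs.all (fun v => v.isSome) then (true, vs.filterMap id)
    else (false, [])

-- ===== PORT B =====
def kwReadyGo : List (Option String) → List String → Bool → Bool × List String
  | [], result, sawNone => if sawNone then (false, []) else (true, result)
  | v :: rest, result, sawNone =>
    if v = some "." then (true, result)
    else match v with
      | none => kwReadyGo rest result true
      | some s => kwReadyGo rest (result ++ [s]) sawNone

def kwargs_ready_alt (vs : List (Option String)) : Bool × List String :=
  kwReadyGo vs [] false

-- ===== PRECONDITION & SPEC =====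
def Spec_kwargs_ready (vs : List (Option String)) (out : Bool × List String) : Prop := out = kwargs_ready_alt vs
instance (vs : List (Option String)) (out : Bool × List String) : Decidable (Spec_kwargs_ready vs out) := by unfold Spec_kwargs_ready; infer_instance

-- ===== CLAIM (what is proved, stated in full; the proofs are below) =====
def Claim_equal_kwargs_ready : Prop := ∀ (vs : List (Option String)), Dom_kwargs_ready vs → Spec_kwargs_ready vs (kwargs_ready vs)

-- ===== LEMMAS AND PROOFS =====

theorem kwReadyGo_char (vs : List (Option String)) :
    ∀ (result : List String) (sawNone : Bool),
    kwReadyGo vs result sawNone =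
      match PySem.List.index? vs (some ".") with
      | some e => (true, result ++ (vs.take e).filterMap id)
      | none =>
        if vs.all (fun v => v.isSome) && !sawNone then (true, result ++ vs.filterMap id)
        else (false, []) := by
  induction vs with
  | nil => intro result sawNone; simp [kwReadyGo, PySem.List.index?]; cases sawNone <;> simp
  | cons v rest ih =>
    intro result sawNone
    by_cases hv : v = some "."
    · subst hv
      rw [PySem.List.index?_cons_self]
      simp [kwReadyGo]
    · rw [PySem.List.index?_cons_of_ne rest hv]
      cases v with
      | none =>
        simp only [kwReadyGo, if_neg hv, ih]
        cases PySem.List.index? rest (some ".") with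
        | some e => simp [List.take]
        | none => simp
      | some s =>
        simp only [kwReadyGo, if_neg hv, ih]
        cases PySem.List.index? rest (some ".") with
        | some e => simp [List.take]
        | none =>
          simp only [Option.map_none, List.all_cons, Option.isSome_some, Bool.true_and,
            List.filterMap_cons, id]
          by_cases hall : (rest.all (fun v => v.isSome) && !sawNone) = true <;> simp [hall]

-- ===== VERDICT (by name: the statement is the Claim_ definition above) =====
theorem kwargs_ready_spec : Claim_equal_kwargs_ready := by
  intro vs _
  unfold Spec_kwargs_ready kwargs_ready kwargs_ready_alt
  rw [kwReadyGo_char]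
  cases h : PySem.List.index? vs (some ".") with
  | some e =>
    have : PySem.List.slice vs none (some (e : Int)) = vs.take e :=
      PySem.List.slice_to_natCast vs e
    simp [this]
  | none => simp
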